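-- pv_equiv track=rewrite | github.com/ninaahmed/Feedback-Borders | border.py | split_count
-- ===== SOURCE A (Python) =====
-- def split_count(input, char_count):
--     output = []
--
--     output.append("".ljust(char_count))
--
--     for line in input:
--         index = 1
--         this_line = line.split()
--         one_line = " "
--         line_index = 0
--
--         while line_index < len(this_line):
--             if index + len(this_line[line_index]) + 1 >= char_count:
--                 output.append(one_line.ljust(char_count))
--                 one_line = " "
--                 index = 1
--
--             one_line += this_line[line_index] + " "
--             index += len(this_line[line_index]) + 1
--             line_index += 1
--
--         if index > 1:
--             output.append(one_line.ljust(char_count))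
--
--         output.append("".ljust(char_count))
--
--     return output
-- ===== SOURCE B (Python) =====
-- def split_count(input, char_count):
--     # Phase 1: per line, compute the greedy break positions as cut indices from
--     # the word LENGTHS alone (pure integer pass), and collect the unpadded
--     # pieces by slicing the word list between consecutive cuts and joining.
--     # Phase 2: pad every collected line uniformly.
--     raw = [""]
--     for line in input:
--         words = line.split()
--         cuts = [0]
--         width = 1
--         for j, w in enumerate(words):
--             if width + len(w) + 1 >= char_count:
--                 cuts.append(j)
--                 width = 1
--             width += len(w) + 1
--         if words:
--             cuts.append(len(words))
--             for a, b in zip(cuts, cuts[1:]):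
--                 raw.append(" " + " ".join(words[a:b]) + (" " if b > a else ""))
--         raw.append("")
--     return [s.ljust(char_count) for s in raw]
-- ===== Notes on version B (the rewrite author's own statement) =====
-- stated objective: alternative
-- what changed: B computes, per line, the greedy break positions as a list of cut indices from the word LENGTHS alone (a pure integer pass, no string accumulation), builds each unpadded piece by slicing the word list between consecutive cuts and ' '.join-ing it, and pads everything in one final ljust pass; A instead accumulates each piece character-by-character while interleaving flushing, padding and output appends in a single loop.
import Mathlib
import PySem

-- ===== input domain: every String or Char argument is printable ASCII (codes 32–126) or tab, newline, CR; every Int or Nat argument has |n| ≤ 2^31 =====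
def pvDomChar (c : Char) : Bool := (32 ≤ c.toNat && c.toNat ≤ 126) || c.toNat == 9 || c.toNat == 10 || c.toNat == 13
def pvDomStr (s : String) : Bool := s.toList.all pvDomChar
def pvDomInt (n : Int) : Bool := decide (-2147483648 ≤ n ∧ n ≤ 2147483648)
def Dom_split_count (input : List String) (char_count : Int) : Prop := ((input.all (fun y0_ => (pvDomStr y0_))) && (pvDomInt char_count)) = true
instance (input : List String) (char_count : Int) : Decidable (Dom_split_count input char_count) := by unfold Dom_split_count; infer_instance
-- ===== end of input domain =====

-- B replaces A's single character-accumulating loop by an integer pass that computes the greedy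
-- break positions (cut indices) from the word lengths alone, and then builds each piece by slicing
-- the word list between consecutive cuts and joining; alternative decomposition, same cost.

-- s.ljust(w) on List Char: pad with spaces up to width w (exact: no pad when w ≤ len(s), incl. negative w)
def pvLjust (cs : List Char) (w : Int) : List Char :=
  cs ++ List.replicate (w - cs.length).toNat ' '

-- ===== PORT A =====
-- A's while loop over the words of one line: state = (output, one_line, index)
def pvALoop (cc : Int) : List (List Char) → List String → List Char → Int →
    List String × List Char × Int
  | [], out, one, idx => (out, one, idx)
  | w :: rest, out, one, idx =>
    -- if index + len(word) + 1 >= char_count: flush one_line, reset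
    let s := if idx + w.length + 1 ≥ cc then (out ++ [String.ofList (pvLjust one cc)], ([' '] : List Char), (1 : Int)) else (out, one, idx)
    -- one_line += word + " "; index += len(word) + 1
    pvALoop cc rest s.1 (s.2.1 ++ w ++ [' ']) (s.2.2 + w.length + 1)

def split_count (input : List String) (char_count : Int) : List String :=
  input.foldl (fun output line =>
    let r := pvALoop char_count (PySem.Chars.split₀ line.toList) output [' '] 1
    let out2 := if r.2.2 > 1 then r.1 ++ [String.ofList (pvLjust r.2.1 char_count)] else r.1
    out2 ++ [String.ofList (pvLjust [] char_count)])
    [String.ofList (pvLjust [] char_count)]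

-- ===== PORT B =====
-- phase 1 step (the body of B's 'for j, w in enumerate(words)' loop): state = (cuts, width)
def pvCutStep (cc : Int) (s : List Int × Int) (p : Int × List Char) : List Int × Int :=
  let s1 := if s.2 + (p.2.length : Int) + 1 ≥ cc then (s.1 ++ [p.1], (1 : Int)) else s
  (s1.1, s1.2 + p.2.length + 1)

-- the raw piece of one (a, b) cut pair: ' ' + ' '.join(words[a:b]) + (' ' if b > a else '')
def pvPieceRaw (words : List (List Char)) (p : Int × Int) : List Char :=
  [' '] ++ PySem.Chars.join [' '] (PySem.List.slice words (some p.1) (some p.2)) ++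
    (if p.2 > p.1 then [' '] else [])

def split_count_alt (input : List String) (char_count : Int) : List String :=
  (input.foldl (fun raw line =>
    let words := PySem.Chars.split₀ line.toList
    let r := (PySem.List.enumerate words).foldl (pvCutStep char_count) ([(0 : Int)], 1)
    let raw2 :=
      if words ≠ [] then
        let cuts2 := r.1 ++ [(words.length : Int)]
        (cuts2.zip cuts2.tail).foldl (fun acc p => acc ++ [pvPieceRaw words p]) raw
      else raw
    raw2 ++ [([] : List Char)])
    [([] : List Char)]).map (fun s => String.ofList (pvLjust s char_count))

-- ===== PRECONDITION & SPEC =====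
def Spec_split_count (input : List String) (char_count : Int) (out : List String) : Prop := out = split_count_alt input char_count
instance (input : List String) (char_count : Int) (out : List String) : Decidable (Spec_split_count input char_count out) := by unfold Spec_split_count; infer_instance

-- ===== CLAIM (what is proved, stated in full; the proofs are below) =====
def Claim_equal_split_count : Prop := ∀ (input : List String) (char_count : Int), Dom_split_count input char_count → Spec_split_count input char_count (split_count input char_count)

-- ===== LEMMAS AND PROOFS =====

-- proof hub: the greedy chunk strings of one line (cur = ' ' + packed words so far)
def pvPack (cc : Int) : List (List Char) → List Char → List (List Char)
  | [], cur => if 1 < cur.length then [cur] else []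
  | w :: rest, cur =>
    if (cur.length : Int) + w.length + 1 ≥ cc then
      cur :: pvPack cc rest ([' '] ++ w ++ [' '])
    else
      pvPack cc rest (cur ++ w ++ [' '])

-- the raw pieces of the consecutive cut pairs of c
def pvPairsMap (words : List (List Char)) (c : List Int) : List (List Char) :=
  (c.zip c.tail).map (pvPieceRaw words)

-- A's loop (started with index = len(one_line)) followed by its final flush equals
-- the formatted chunks of pvPack appended to the accumulated output.
theorem pvALoop_pack (cc : Int) : ∀ (ws : List (List Char)) (out : List String) (one : List Char) (idx : Int),
    idx = (one.length : Int) →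
    (if (pvALoop cc ws out one idx).2.2 > 1
       then (pvALoop cc ws out one idx).1 ++ [String.ofList (pvLjust (pvALoop cc ws out one idx).2.1 cc)]
       else (pvALoop cc ws out one idx).1)
    = out ++ (pvPack cc ws one).map (fun cs => String.ofList (pvLjust cs cc)) := by
  intro ws
  induction ws with
  | nil =>
    intro out one idx hidx
    subst hidx
    simp only [pvALoop, pvPack]
    by_cases h : 1 < one.length
    · have : ((one.length : Int) > 1) := by exact_mod_cast h
      simp [this, h]
    · have : ¬ ((one.length : Int) > 1) := by exact_mod_cast h
      simp [this, h]
  | cons w rest ih =>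
    intro out one idx hidx
    subst hidx
    simp only [pvALoop, pvPack]
    by_cases h : (one.length : Int) + w.length + 1 ≥ cc
    · simp only [h, if_pos]
      rw [ih _ _ _ (by simp; omega)]
      simp
    · simp only [h, if_neg, not_false_iff]
      rw [ih _ _ _ (by simp; omega)]

-- appending one more cut adds exactly one piece, between the two last cuts
theorem pvPairsMap_snoc (words : List (List Char)) :
    ∀ (l : List Int) (p j : Int),
    pvPairsMap words (l ++ [p] ++ [j]) = pvPairsMap words (l ++ [p]) ++ [pvPieceRaw words (p, j)] := by
  have hz : ∀ (l : List Int) (p j : Int),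
      ((l ++ [p] ++ [j]).zip (l ++ [p] ++ [j]).tail) = ((l ++ [p]).zip (l ++ [p]).tail) ++ [(p, j)] := by
    intro l
    induction l with
    | nil => intro p j; simp [List.zip]
    | cons x t ih =>
      intro p j
      cases t with
      | nil => simp [List.zip]
      | cons y t' =>
        have := ih p j
        simp only [List.cons_append, List.tail_cons, List.zip] at this ⊢
        simp [List.zipWith] at this ⊢
        exact this
  intro l p j
  unfold pvPairsMap
  rw [hz, List.map_append]
  rfl

-- ' '.join(ws) plus the trailing space (present iff ws ≠ []) is the flat word+space image
theorem pvJoinFlat : ∀ (l : List (List Char)),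
    PySem.Chars.join [' '] l ++ (if l ≠ [] then [' '] else []) = l.flatMap (fun w => w ++ [' ']) := by
  intro l
  induction l with
  | nil => simp [PySem.Chars.join_nil]
  | cons w t ih =>
    cases t with
    | nil => simp [PySem.Chars.join_singleton]
    | cons v t' =>
      rw [PySem.Chars.join_cons_cons]
      simp only [ne_eq, reduceCtorEq, not_false_eq_true, if_pos, List.flatMap_cons] at ih ⊢
      rw [List.append_assoc, List.append_assoc, ih]
      simp

-- the raw piece of the cut pair (|pre|, |pre|+|cur|) is the chunk string of cur
theorem pvFmtChunk (pre cur rest : List (List Char)) :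
    pvPieceRaw (pre ++ cur ++ rest) ((pre.length : Int), ((pre.length + cur.length : Nat) : Int))
    = [' '] ++ cur.flatMap (fun w => w ++ [' ']) := by
  unfold pvPieceRaw
  rw [PySem.List.slice_natCast]
  have hslice : ((pre ++ cur ++ rest).drop pre.length).take (pre.length + cur.length - pre.length) = cur := by
    rw [List.append_assoc, List.drop_left]
    simp
  rw [hslice]
  by_cases h : cur = []
  · subst h; simp
  · have hg : (((pre.length + cur.length : Nat) : Int) > (pre.length : Int)) := by
      have : 0 < cur.length := List.length_pos_iff.mpr h
      exact_mod_cast by omega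
    have hjf : PySem.Chars.join [' '] cur ++ [' '] = cur.flatMap (fun w => w ++ [' ']) := by
      have := pvJoinFlat cur
      simpa [h] using this
    rw [if_pos hg, List.append_assoc, hjf]

-- main B-side invariant: running the cut loop from a partial state and closing with the final
-- cut yields exactly the already-closed pieces plus the pvPack chunks of the remaining words
theorem pvBGo (cc : Int) (words : List (List Char)) :
    ∀ (ws pre cur : List (List Char)) (cuts0 : List Int),
    words = pre ++ cur ++ ws →
    (cur = [] → ws ≠ []) →
    pvPairsMap words
      (((PySem.List.enumerate ws ((pre.length + cur.length : Nat) : Int)).foldl (pvCutStep cc)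
          (cuts0 ++ [(pre.length : Int)], (([' '] ++ cur.flatMap (fun w => w ++ [' '])).length : Int))).1
        ++ [(words.length : Int)])
    = pvPairsMap words (cuts0 ++ [(pre.length : Int)])
      ++ pvPack cc ws ([' '] ++ cur.flatMap (fun w => w ++ [' '])) := by
  intro ws
  induction ws with
  | nil =>
    intro pre cur cuts0 hw hcur
    subst hw
    have hc : cur ≠ [] := fun h => (hcur h) rfl
    simp only [PySem.List.enumerate_nil, List.foldl_nil]
    have hL : (((pre ++ cur ++ ([] : List (List Char))).length : Nat) : Int) = ((pre.length + cur.length : Nat) : Int) := by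
      simp
    rw [hL, pvPairsMap_snoc, pvFmtChunk pre cur []]
    have hone : 1 < ([' '] ++ cur.flatMap (fun w => w ++ [' '])).length := by
      cases cur with
      | nil => exact absurd rfl hc
      | cons a t => simp only [List.flatMap_cons, List.append_assoc, List.length_append, List.length_cons, List.length_nil]; omega
    simp only [pvPack]
    rw [if_pos hone]
  | cons w rest ih =>
    intro pre cur cuts0 hw hcur
    subst hw
    rw [PySem.List.enumerate_cons, List.foldl_cons]
    by_cases h : (([' '] ++ cur.flatMap (fun u => u ++ [' '])).length : Int) + (w.length : Int) + 1 ≥ cc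
    · -- flush: close the current chunk at cut pre.length + cur.length, restart with [w]
      have hstep : pvCutStep cc (cuts0 ++ [(pre.length : Int)], (([' '] ++ cur.flatMap (fun u => u ++ [' '])).length : Int)) (((pre.length + cur.length : Nat) : Int), w) =
          ((cuts0 ++ [(pre.length : Int)]) ++ [((pre.length + cur.length : Nat) : Int)], 1 + (w.length : Int) + 1) := by
        simp only [pvCutStep]
        rw [if_pos h]
      rw [hstep]
      have ih' := ih (pre ++ cur) [w] (cuts0 ++ [(pre.length : Int)])
        (by simp) (by simp)
      have harg1 : (((pre ++ cur).length + ([w] : List (List Char)).length : Nat) : Int) = ((pre.length + cur.length : Nat) : Int) + 1 := by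
        simp
      have harg2 : (((pre ++ cur).length : Nat) : Int) = ((pre.length + cur.length : Nat) : Int) := by
        simp
      have harg3 : (([' '] ++ ([w] : List (List Char)).flatMap (fun u => u ++ [' '])).length : Int) = 1 + (w.length : Int) + 1 := by
        simp; omega
      rw [harg1, harg2, harg3] at ih'
      have hwords : pre ++ cur ++ w :: rest = (pre ++ cur) ++ [w] ++ rest := by simp
      rw [show ((pre ++ cur ++ w :: rest).length : Int) = (((pre ++ cur) ++ [w] ++ rest).length : Int) by rw [hwords]] at ih' ⊢
      rw [ih']
      rw [pvPairsMap_snoc]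
      have hfc := pvFmtChunk pre cur (w :: rest)
      rw [hfc]
      simp only [pvPack]
      rw [if_pos h]
      simp
    · -- no flush: the word joins the current chunk
      have hstep : pvCutStep cc (cuts0 ++ [(pre.length : Int)], (([' '] ++ cur.flatMap (fun u => u ++ [' '])).length : Int)) (((pre.length + cur.length : Nat) : Int), w) =
          (cuts0 ++ [(pre.length : Int)], (([' '] ++ cur.flatMap (fun u => u ++ [' '])).length : Int) + (w.length : Int) + 1) := by
        simp only [pvCutStep]
        rw [if_neg h]
      rw [hstep]
      have ih' := ih pre (cur ++ [w]) cuts0 (by simp) (by simp)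
      have harg1 : ((pre.length + (cur ++ [w]).length : Nat) : Int) = ((pre.length + cur.length : Nat) : Int) + 1 := by
        simp; omega
      have harg3 : (([' '] ++ (cur ++ [w]).flatMap (fun u => u ++ [' '])).length : Int) = (([' '] ++ cur.flatMap (fun u => u ++ [' '])).length : Int) + (w.length : Int) + 1 := by
        simp; omega
      rw [harg1, harg3] at ih'
      rw [show (pre ++ cur ++ w :: rest) = (pre ++ (cur ++ [w]) ++ rest) by simp] at ih'
      rw [show (pre ++ cur ++ w :: rest) = (pre ++ (cur ++ [w]) ++ rest) by simp]
      rw [ih']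
      simp only [pvPack]
      rw [if_neg h]
      have hcs : [' '] ++ (cur ++ [w]).flatMap (fun u => u ++ [' ']) = ([' '] ++ cur.flatMap (fun u => u ++ [' '])) ++ w ++ [' '] := by
        simp
      rw [hcs]

-- B's per-line raw pieces are exactly the pvPack chunks of the line's words
theorem pvRawLine (cc : Int) (ws : List (List Char)) (raw : List (List Char)) :
    (if ws ≠ [] then
       List.foldl (fun acc p => acc ++ [pvPieceRaw ws p]) raw
         (List.zip
           (((PySem.List.enumerate ws).foldl (pvCutStep cc) ([(0 : Int)], 1)).1 ++ [(ws.length : Int)])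
           ((((PySem.List.enumerate ws).foldl (pvCutStep cc) ([(0 : Int)], 1)).1 ++ [(ws.length : Int)]).tail))
     else raw)
    = raw ++ pvPack cc ws [' '] := by
  by_cases hw : ws = []
  · subst hw
    simp [pvPack]
  · rw [if_pos hw]
    rw [PySem.List.foldl_append_singleton_eq_map]
    have hb := pvBGo cc ws ws [] [] [] (by simp) (fun _ => hw)
    simp only [List.nil_append, List.length_nil, List.flatMap_nil, List.append_nil,
      Nat.add_zero, Nat.zero_add, Nat.cast_zero, Nat.cast_one, List.length_cons] at hb
    unfold pvPairsMap at hb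
    simp only [List.tail_cons, List.zip_nil_right, List.map_nil, List.nil_append] at hb
    rw [hb]

-- the per-input-line fold: A's output stays the padded image of B's raw list
theorem pvFoldEq (cc : Int) : ∀ (inp : List String) (raw : List (List Char)),
    inp.foldl (fun output line =>
      (if (pvALoop cc (PySem.Chars.split₀ line.toList) output [' '] 1).2.2 > 1
         then (pvALoop cc (PySem.Chars.split₀ line.toList) output [' '] 1).1
              ++ [String.ofList (pvLjust (pvALoop cc (PySem.Chars.split₀ line.toList) output [' '] 1).2.1 cc)]
         else (pvALoop cc (PySem.Chars.split₀ line.toList) output [' '] 1).1)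
        ++ [String.ofList (pvLjust [] cc)])
      (raw.map (fun s => String.ofList (pvLjust s cc)))
    = (inp.foldl (fun r line =>
        (if PySem.Chars.split₀ line.toList ≠ [] then
           List.foldl (fun acc p => acc ++ [pvPieceRaw (PySem.Chars.split₀ line.toList) p]) r
             (List.zip
               (((PySem.List.enumerate (PySem.Chars.split₀ line.toList)).foldl (pvCutStep cc) ([(0 : Int)], 1)).1
                 ++ [((PySem.Chars.split₀ line.toList).length : Int)])
               ((((PySem.List.enumerate (PySem.Chars.split₀ line.toList)).foldl (pvCutStep cc) ([(0 : Int)], 1)).1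
                 ++ [((PySem.Chars.split₀ line.toList).length : Int)]).tail))
         else r)
          ++ [([] : List Char)]) raw).map (fun s => String.ofList (pvLjust s cc)) := by
  intro inp
  induction inp with
  | nil => intro raw; rfl
  | cons line rest ih =>
    intro raw
    simp only [List.foldl_cons]
    rw [pvALoop_pack cc (PySem.Chars.split₀ line.toList) (raw.map (fun s => String.ofList (pvLjust s cc))) [' '] 1 (by simp)]
    rw [pvRawLine cc (PySem.Chars.split₀ line.toList) raw]
    rw [← ih (raw ++ pvPack cc (PySem.Chars.split₀ line.toList) [' '] ++ [([] : List Char)])]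
    simp

-- ===== VERDICT (by name: the statement is the Claim_ definition above) =====
theorem split_count_spec : Claim_equal_split_count := by
  intro input cc _
  show split_count input cc = split_count_alt input cc
  unfold split_count split_count_alt
  have := pvFoldEq cc input [([] : List Char)]
  simpa using this
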